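-- pv_equiv track=rewrite | github.com/tosgojinoo/Algorithm | baekjoon/23291_어항정리_구현.py | fold_fishbowl_array
-- ===== SOURCE A (Python) =====
-- def fold_fishbowl_array(arr, time):
--     if type(arr[0]) != list: # 한 행 구성일 경우 처리
--         arr = [arr]
--     n = len(arr[0])//2 # 접었을 때 길이
--     if time == 2: # 2번 반복 끝남. 중지
--         return arr
--     tmp = []
--     for row in arr[::-1]: # 역순
--         tmp += [row[:n][::-1]] # 절반 앞부분의 역순
--     for row in arr: # 정순
--         tmp += [row[n:]] # 절반 뒷부분의 정순
--     return fold_fishbowl_array(tmp, time+1)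
-- ===== SOURCE B (Python) =====
-- def fold_fishbowl_array(arr, time):
--     if type(arr[0]) != list:  # single flat row: wrap once up front
--         arr = [arr]
--     while time < 2:
--         n = len(arr[0]) // 2
--         arr = [row[:n][::-1] for row in reversed(arr)] + [row[n:] for row in arr]
--         time += 1
--     return arr
-- ===== Notes on version B (the rewrite author's own statement) =====
-- stated objective: idiomatic
-- what changed: Replaces the bounded tail recursion by an iterative while-loop whose folding pass is built from two list comprehensions instead of accumulating tmp += [...] in two explicit loops.
import Mathlib
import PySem

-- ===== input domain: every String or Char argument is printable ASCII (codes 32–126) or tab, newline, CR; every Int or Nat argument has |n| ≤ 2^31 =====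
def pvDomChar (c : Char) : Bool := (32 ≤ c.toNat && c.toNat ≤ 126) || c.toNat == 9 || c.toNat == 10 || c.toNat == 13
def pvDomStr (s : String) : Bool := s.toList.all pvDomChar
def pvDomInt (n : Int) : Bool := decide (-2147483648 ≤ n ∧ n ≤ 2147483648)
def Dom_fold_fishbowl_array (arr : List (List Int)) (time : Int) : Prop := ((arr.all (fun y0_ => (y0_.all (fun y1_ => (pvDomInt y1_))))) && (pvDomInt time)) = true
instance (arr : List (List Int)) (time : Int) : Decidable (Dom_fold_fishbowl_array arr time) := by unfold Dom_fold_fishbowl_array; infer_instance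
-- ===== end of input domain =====

-- B replaces A's bounded tail recursion by an iterative while-loop whose folding pass is two
-- list comprehensions (map ++ map) instead of tmp += [...] accumulation; same cost (objective: idiomatic).

-- ===== PORT A =====
-- A recurses with time+1 until time == 2; the fuel (2 - time).toNat counts exactly the remaining
-- recursive calls when time ≤ 2 (Pre_); for time > 2 the Python diverges, which Pre_ excludes,
-- so the fuel-0 branch is never claimed about. The 'type(arr[0]) != list' wrap branch cannot fire
-- on the typed domain List (List Int) and is omitted. len(arr[0]) → (arr.headD []).length, exact
-- for arr ≠ [] (Pre_: on [] Python raises IndexError). row[:n] = take n, row[n:] = drop n,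
-- row[::-1] / arr[::-1] = reverse — exact since n = len//2 is a nonnegative in-range index.
def fold_fishbowl_arrayFuel : List (List Int) → Int → Nat → List (List Int)
  | arr, time, fuel =>
    let n := (arr.headD []).length / 2
    if time = 2 then arr
    else
      -- tmp = [];  for row in arr[::-1]: tmp += [row[:n][::-1]];  for row in arr: tmp += [row[n:]]
      let tmp := arr.foldl (fun t row => t ++ [row.drop n])
                  (arr.reverse.foldl (fun t row => t ++ [(row.take n).reverse]) [])
      match fuel with
      | 0 => tmp
      | k+1 => fold_fishbowl_arrayFuel tmp (time+1) k

def fold_fishbowl_array (arr : List (List Int)) (time : Int) : List (List Int) :=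
  fold_fishbowl_arrayFuel arr time (2 - time).toNat

-- ===== PORT B =====
-- one folding pass: [row[:n][::-1] for row in reversed(arr)] + [row[n:] for row in arr]
def pvPassB (arr : List (List Int)) : List (List Int) :=
  let n := (arr.headD []).length / 2
  (arr.reverse.map (fun row => (row.take n).reverse)) ++ (arr.map (fun row => row.drop n))

-- while time < 2: arr = pass arr; time += 1   — runs exactly (2 - time).toNat times
def pvLoopB : List (List Int) → Nat → List (List Int)
  | arr, 0 => arr
  | arr, k+1 => pvLoopB (pvPassB arr) k

def fold_fishbowl_array_alt (arr : List (List Int)) (time : Int) : List (List Int) :=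
  pvLoopB arr (2 - time).toNat

-- ===== PRECONDITION & SPEC =====
-- Pre_ excludes arr = [] (Python A raises IndexError on len(arr[0])) and time ≥ 3
-- (A's recursion passes the time == 2 stop check and never terminates).
def Pre_fold_fishbowl_array (arr : List (List Int)) (time : Int) : Prop :=
  arr ≠ [] ∧ time ≤ 2
instance (arr : List (List Int)) (time : Int) : Decidable (Pre_fold_fishbowl_array arr time) := by
  unfold Pre_fold_fishbowl_array; infer_instance

def pvWitness_fold_fishbowl_array : List (List Int) × Int := ([[1, 2, 3, 4], [5, 6, 7, 8]], 0)

def Spec_fold_fishbowl_array (arr : List (List Int)) (time : Int) (out : List (List Int)) : Prop := out = fold_fishbowl_array_alt arr time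
instance (arr : List (List Int)) (time : Int) (out : List (List Int)) : Decidable (Spec_fold_fishbowl_array arr time out) := by unfold Spec_fold_fishbowl_array; infer_instance

-- ===== CLAIM (what is proved, stated in full; the proofs are below) =====
def Claim_equal_fold_fishbowl_array : Prop := ∀ (arr : List (List Int)) (time : Int), Dom_fold_fishbowl_array arr time → Pre_fold_fishbowl_array arr time → Spec_fold_fishbowl_array arr time (fold_fishbowl_array arr time)

-- ===== LEMMAS AND PROOFS =====

theorem foldl_append_singleton_map (xs : List (List Int)) (g : List Int → List Int)
    (acc : List (List Int)) :
    xs.foldl (fun t row => t ++ [g row]) acc = acc ++ xs.map g := by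
  induction xs generalizing acc with
  | nil => simp
  | cons x xs ih => simp [List.foldl, ih]

theorem fuel_eq_loop (k : Nat) : ∀ (arr : List (List Int)) (time : Int), time = 2 - (k : Int) →
    fold_fishbowl_arrayFuel arr time k = pvLoopB arr k := by
  induction k with
  | zero =>
    intro arr time ht
    simp only [Nat.cast_zero, sub_zero] at ht
    simp [fold_fishbowl_arrayFuel, ht, pvLoopB]
  | succ k ih =>
    intro arr time ht
    have hne : time ≠ 2 := by omega
    rw [fold_fishbowl_arrayFuel]
    simp only [hne, if_false]
    have htmp : (fun (arr : List (List Int)) =>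
        arr.foldl (fun t row => t ++ [row.drop ((arr.headD []).length / 2)])
          (arr.reverse.foldl (fun t row => t ++ [(row.take ((arr.headD []).length / 2)).reverse]) []))
        arr = pvPassB arr := by
      simp only [pvPassB, foldl_append_singleton_map, List.nil_append]
    simp only at htmp
    rw [htmp, pvLoopB]
    exact ih (pvPassB arr) (time + 1) (by push_cast at ht ⊢; omega)

-- ===== VERDICT (by name: the statement is the Claim_ definition above) =====
theorem fold_fishbowl_array_spec : Claim_equal_fold_fishbowl_array := by
  intro arr time _ hpre
  obtain ⟨-, hle⟩ := hpre
  unfold Spec_fold_fishbowl_array fold_fishbowl_array fold_fishbowl_array_alt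
  exact fuel_eq_loop (2 - time).toNat arr time (by omega)
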